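-- pv_equiv track=rewrite | github.com/DragonEggBedrockBreaking/Advent-Of-Code | 2023/17/part1-FAILED.py | check_restriction
-- ===== SOURCE A (Python) =====
-- def check_restriction(current, neighbour, path):
--     if len(path) >= 3:
--         five = (path[-3], path[-2], path[-1], current, neighbour)
--         if len(set([node[0] for node in five])) == 1 and tuple(sorted(five, key=lambda node: node[1])) == five:
--             return False
--         if len(set([node[1] for node in five])) == 1 and tuple(sorted(five, key=lambda node: node[0])) == five:
--             return False
--     return True
-- ===== SOURCE B (Python) =====
-- def check_restriction(current, neighbour, path):
--     if len(path) >= 3: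
--         nodes = [path[-3], path[-2], path[-1], current, neighbour]
--         same_x = same_y = inc_x = inc_y = True
--         prev = nodes[0]
--         for node in nodes[1:]:
--             same_x = same_x and node[0] == prev[0]
--             same_y = same_y and node[1] == prev[1]
--             inc_x = inc_x and prev[0] <= node[0]
--             inc_y = inc_y and prev[1] <= node[1]
--             prev = node
--         if (same_x and inc_y) or (same_y and inc_x):
--             return False
--     return True
-- ===== Notes on version B (the rewrite author's own statement) =====
-- stated objective: simpler
-- what changed: Replaces the set-cardinality test and the stable sort-then-compare with a single pass over the five nodes that accumulates four boolean flags (same-x, same-y, non-decreasing-x, non-decreasing-y) against the previous node, then combines the flags.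
import Mathlib
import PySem

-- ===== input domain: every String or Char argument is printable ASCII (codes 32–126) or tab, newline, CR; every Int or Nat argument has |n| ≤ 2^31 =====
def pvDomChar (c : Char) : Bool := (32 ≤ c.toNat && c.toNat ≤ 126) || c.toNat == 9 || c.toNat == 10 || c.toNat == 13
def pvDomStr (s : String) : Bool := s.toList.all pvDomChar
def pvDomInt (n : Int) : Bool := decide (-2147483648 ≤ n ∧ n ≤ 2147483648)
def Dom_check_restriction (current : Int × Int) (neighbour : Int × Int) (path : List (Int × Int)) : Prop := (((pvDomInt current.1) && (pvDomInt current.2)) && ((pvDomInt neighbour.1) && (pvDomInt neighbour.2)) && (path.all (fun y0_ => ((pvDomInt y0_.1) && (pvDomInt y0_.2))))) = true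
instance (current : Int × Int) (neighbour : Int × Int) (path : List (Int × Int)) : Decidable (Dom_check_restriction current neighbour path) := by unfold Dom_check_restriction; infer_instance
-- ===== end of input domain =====

-- B replaces A's set-cardinality test and stable sort-then-compare by a single pass
-- over the five nodes accumulating four boolean flags against the previous node (simpler).

-- ===== PORT A =====
def check_restriction (current : Int × Int) (neighbour : Int × Int) (path : List (Int × Int)) : Bool :=
  if 3 ≤ path.length then
    -- path[-3], path[-2], path[-1]: in range because len(path) >= 3, so the none arm is unreachable
    match PySem.List.pyGet? path (-3), PySem.List.pyGet? path (-2), PySem.List.pyGet? path (-1) with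
    | some p3, some p2, some p1 =>
      let five : List (Int × Int) := [p3, p2, p1, current, neighbour]
      if (PySem.Set.ofList (five.map (fun node => node.1))).length == 1
          && PySem.List.sorted five (fun node => node.2) false == five then false
      else if (PySem.Set.ofList (five.map (fun node => node.2))).length == 1
          && PySem.List.sorted five (fun node => node.1) false == five then false
      else true
    | _, _, _ => true
  else true

-- ===== PORT B =====
-- B's loop state: (same_x, same_y, inc_x, inc_y, prev)
def pvFlagsStep (st : Bool × Bool × Bool × Bool × (Int × Int)) (node : Int × Int) :
    Bool × Bool × Bool × Bool × (Int × Int) :=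
  match st with
  | (sx, sy, ix, iy, prev) =>
    (sx && node.1 == prev.1, sy && node.2 == prev.2,
     ix && decide (prev.1 ≤ node.1), iy && decide (prev.2 ≤ node.2), node)

def check_restriction_alt (current : Int × Int) (neighbour : Int × Int) (path : List (Int × Int)) : Bool :=
  if 3 ≤ path.length then
    -- path[-3], path[-2], path[-1]: in range because len(path) >= 3, so the none fallback is unreachable
    (((PySem.List.pyGet? path (-3)).bind fun a =>
      (PySem.List.pyGet? path (-2)).bind fun b =>
      (PySem.List.pyGet? path (-1)).map fun c =>
        let nodes : List (Int × Int) := [a, b, c, current, neighbour]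
        match nodes.tail.foldl pvFlagsStep (true, true, true, true, nodes.headI) with
        | (sx, sy, ix, iy, _) =>
          if (sx && iy) || (sy && ix) then false else true) : Option Bool).getD true
  else true

-- ===== PRECONDITION & SPEC =====
def Spec_check_restriction (current : Int × Int) (neighbour : Int × Int) (path : List (Int × Int)) (out : Bool) : Prop := out = check_restriction_alt current neighbour path
instance (current : Int × Int) (neighbour : Int × Int) (path : List (Int × Int)) (out : Bool) : Decidable (Spec_check_restriction current neighbour path out) := by unfold Spec_check_restriction; infer_instance

-- ===== CLAIM =====
def Claim_equal_check_restriction : Prop := ∀ (current : Int × Int) (neighbour : Int × Int) (path : List (Int × Int)), Dom_check_restriction current neighbour path → Spec_check_restriction current neighbour path (check_restriction current neighbour path)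

-- ===== LEMMAS AND PROOFS =====

-- len(set([x1..x5])) == 1 is exactly "all five values equal"
theorem pv_set_len_one_iff (x1 x2 x3 x4 x5 : Int) :
    ((PySem.Set.ofList [x1,x2,x3,x4,x5]).length = 1) ↔ (x1 = x2 ∧ x2 = x3 ∧ x3 = x4 ∧ x4 = x5) := by
  simp [PySem.Set.ofList, PySem.Set.add]
  split_ifs <;> simp_all <;> omega

-- the stable sort by snd fixes the 5-list exactly when snd is non-decreasing
theorem pv_sorted_snd_eq_iff (a b c d e : Int × Int) :
    (PySem.List.sorted [a,b,c,d,e] (fun n => n.2) false = [a,b,c,d,e]) ↔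
      (a.2 ≤ b.2 ∧ b.2 ≤ c.2 ∧ c.2 ≤ d.2 ∧ d.2 ≤ e.2) := by
  constructor
  · intro h
    have hp := PySem.List.sorted_pairwise [a,b,c,d,e] (fun n => n.2)
    rw [h] at hp
    simp [List.pairwise_cons] at hp
    tauto
  · intro h
    apply PySem.List.sorted_eq_self_of_pairwise
    simp [List.pairwise_cons]
    omega

-- the stable sort by fst fixes the 5-list exactly when fst is non-decreasing
theorem pv_sorted_fst_eq_iff (a b c d e : Int × Int) :
    (PySem.List.sorted [a,b,c,d,e] (fun n => n.1) false = [a,b,c,d,e]) ↔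
      (a.1 ≤ b.1 ∧ b.1 ≤ c.1 ∧ c.1 ≤ d.1 ∧ d.1 ≤ e.1) := by
  constructor
  · intro h
    have hp := PySem.List.sorted_pairwise [a,b,c,d,e] (fun n => n.1)
    rw [h] at hp
    simp [List.pairwise_cons] at hp
    tauto
  · intro h
    apply PySem.List.sorted_eq_self_of_pairwise
    simp [List.pairwise_cons]
    omega

-- merging A's two sequential early-return branches into B's single disjunction
theorem pv_if_or (x y u v : Bool) :
    (if x && y then false else if u && v then false else true)
      = (if (x && y) || (u && v) then false else true) := by
  cases x <;> cases y <;> cases u <;> cases v <;> rfl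

-- A's branch structure on the unpacked five agrees with B's flag-accumulating pass
theorem pv_core (a b c cur nb : Int × Int) :
    (if (PySem.Set.ofList ([a,b,c,cur,nb].map (fun node => node.1))).length == 1
          && PySem.List.sorted [a,b,c,cur,nb] (fun node => node.2) false == [a,b,c,cur,nb] then false
      else if (PySem.Set.ofList ([a,b,c,cur,nb].map (fun node => node.2))).length == 1
          && PySem.List.sorted [a,b,c,cur,nb] (fun node => node.1) false == [a,b,c,cur,nb] then false
      else true)
    = (let nodes : List (Int × Int) := [a, b, c, cur, nb]
       match nodes.tail.foldl pvFlagsStep (true, true, true, true, nodes.headI) with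
       | (sx, sy, ix, iy, _) =>
         if (sx && iy) || (sy && ix) then false else true) := by
  have c1 : ((PySem.Set.ofList ([a,b,c,cur,nb].map (fun node => node.1))).length == 1
        && PySem.List.sorted [a,b,c,cur,nb] (fun node => node.2) false == [a,b,c,cur,nb])
      = ((b.1 == a.1 && c.1 == b.1 && cur.1 == c.1 && nb.1 == cur.1)
        && (decide (a.2 ≤ b.2) && decide (b.2 ≤ c.2) && decide (c.2 ≤ cur.2) && decide (cur.2 ≤ nb.2))) := by
    rw [Bool.eq_iff_iff]
    simp only [List.map, Bool.and_eq_true, beq_iff_eq, decide_eq_true_eq,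
      pv_set_len_one_iff, pv_sorted_snd_eq_iff]
    omega
  have c2 : ((PySem.Set.ofList ([a,b,c,cur,nb].map (fun node => node.2))).length == 1
        && PySem.List.sorted [a,b,c,cur,nb] (fun node => node.1) false == [a,b,c,cur,nb])
      = ((b.2 == a.2 && c.2 == b.2 && cur.2 == c.2 && nb.2 == cur.2)
        && (decide (a.1 ≤ b.1) && decide (b.1 ≤ c.1) && decide (c.1 ≤ cur.1) && decide (cur.1 ≤ nb.1))) := by
    rw [Bool.eq_iff_iff]
    simp only [List.map, Bool.and_eq_true, beq_iff_eq, decide_eq_true_eq,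
      pv_set_len_one_iff, pv_sorted_fst_eq_iff]
    omega
  rw [c1, c2]
  simp only [List.tail, List.headI, List.foldl, pvFlagsStep, Bool.true_and]
  exact pv_if_or _ _ _ _

-- ===== VERDICT =====
theorem check_restriction_spec : Claim_equal_check_restriction := by
  intro current neighbour path _
  unfold Spec_check_restriction check_restriction check_restriction_alt
  by_cases hlen : 3 ≤ path.length
  · have h3 : PySem.List.pyGet? path (-3) = path[path.length - 3]? :=
      PySem.List.pyGet?_neg_ofNat path 3 (by omega) (by omega)
    have h2 : PySem.List.pyGet? path (-2) = path[path.length - 2]? :=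
      PySem.List.pyGet?_neg_ofNat path 2 (by omega) (by omega)
    have h1 : PySem.List.pyGet? path (-1) = path[path.length - 1]? :=
      PySem.List.pyGet?_neg_ofNat path 1 (by omega) (by omega)
    obtain ⟨p3, hp3⟩ : ∃ v, path[path.length - 3]? = some v :=
      ⟨_, List.getElem?_eq_getElem (by omega)⟩
    obtain ⟨p2, hp2⟩ : ∃ v, path[path.length - 2]? = some v :=
      ⟨_, List.getElem?_eq_getElem (by omega)⟩
    obtain ⟨p1, hp1⟩ : ∃ v, path[path.length - 1]? = some v :=
      ⟨_, List.getElem?_eq_getElem (by omega)⟩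
    rw [if_pos hlen, if_pos hlen, h3, h2, h1, hp3, hp2, hp1]
    simp only [Option.bind_some, Option.map_some, Option.getD_some]
    exact pv_core p3 p2 p1 current neighbour
  · rw [if_neg hlen, if_neg hlen]
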